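-- pv_equiv track=rewrite | github.com/linhdvu14/cp-sols | sols/CodeForces/1744_d3/E2_Divisible_Numbers_hard_version_.py | solve
-- ===== SOURCE A (Python) =====
-- def factorize(n):
--     small, large = [], []
--     for i in range(1, int(n**0.5) + 1, 2 if n & 1 else 1):
--         if n % i == 0:
--             small.append(i)
--             large.append(n // i)
--     if small[-1] == large[-1]: large.pop()
--     return small + large[::-1]
--
-- def solve(a, b, c, d):
--     facs_a = factorize(a)
--     facs_b = factorize(b)
--     tar = a * b
--
--     for fa in facs_a:
--         for fb in facs_b:
--             fx = fa * fb
--             x = (a // fx + 1) * fx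
--             fy = tar // fx
--             y = (b // fy + 1) * fy
--             if x <= c and y <= d: return x, y
--
--     return -1, -1
-- ===== SOURCE B (Python) =====
-- def factorize(n):
--     # prime-power table by trial division, then divisors as products of prime powers
--     pf = []
--     m, p = n, 2
--     while p * p <= m:
--         if m % p == 0:
--             k = 0
--             while m % p == 0:
--                 m //= p
--                 k += 1
--             pf.append((p, k))
--         p += 1
--     if m > 1:
--         pf.append((m, 1))
--     divs = [1]
--     for p, k in pf:
--         divs = [d * p ** e for d in divs for e in range(k + 1)]
--     divs.sort()
--     return divs
--
-- def solve(a, b, c, d):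
--     tar = a * b
--     fas, fbs = factorize(a), factorize(b)
--     cands = ((
--         (a // (fa * fb) + 1) * (fa * fb),
--         (b // (tar // (fa * fb)) + 1) * (tar // (fa * fb)),
--     ) for fa in fas for fb in fbs)
--     return next(((x, y) for x, y in cands if x <= c and y <= d), (-1, -1))
-- ===== Notes on version B (the rewrite author's own statement) =====
-- stated objective: alternative
-- what changed: factorize now builds the prime-power table of n by trial division and generates the sorted divisor list as the cartesian product of prime powers (instead of scanning 1..sqrt(n) collecting small/large divisor pairs), and solve consumes the candidate pairs through one generator pipeline with next(..., default) instead of nested loops with early return.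
import Mathlib
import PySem

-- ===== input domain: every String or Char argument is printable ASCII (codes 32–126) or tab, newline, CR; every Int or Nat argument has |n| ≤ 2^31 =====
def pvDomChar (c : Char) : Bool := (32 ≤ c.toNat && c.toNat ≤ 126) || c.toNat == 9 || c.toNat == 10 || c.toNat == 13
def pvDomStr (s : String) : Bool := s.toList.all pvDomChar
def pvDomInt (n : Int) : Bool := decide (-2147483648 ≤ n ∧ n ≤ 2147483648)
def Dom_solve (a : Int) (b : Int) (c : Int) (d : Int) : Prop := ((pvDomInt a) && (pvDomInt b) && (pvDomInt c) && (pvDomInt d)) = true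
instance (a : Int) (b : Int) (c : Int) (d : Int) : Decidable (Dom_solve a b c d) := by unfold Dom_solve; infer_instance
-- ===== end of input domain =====

-- B replaces factorize's small/large scan of 1..sqrt(n) by a prime-power table built by trial
-- division whose cartesian product, sorted, is the divisor list, and solve consumes the candidate
-- pairs through one generator pipeline with next(..., default); same return value as A on Pre_.

-- ===== PORT A =====

-- int(n**0.5): equals the integer square root for 0 ≤ n ≤ 2^31 (CPython's pow is correctly
-- rounded there); for n < 0 Python raises TypeError (n**0.5 is complex) — outside Pre_.
def factorizeA (n : Int) : List Int :=
  let step : Int := if PySem.Int.band n 1 ≠ 0 then 2 else 1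
  let r : Int := (n.toNat.sqrt : Int)
  let p := (PySem.List.pyRange 1 (r + 1) step).foldl
      (fun (sl : List Int × List Int) i =>
        if PySem.Int.mod n i = 0 then (sl.1 ++ [i], sl.2 ++ [PySem.Int.floordiv n i]) else sl)
      ([], [])
  let small := p.1
  -- small[-1] raises IndexError only when small = [], i.e. n ≤ 0 (outside Pre_);
  -- large.pop() removes the last element (dropLast keeps the list A then reverses).
  let large := if PySem.List.pyGet? small (-1) = PySem.List.pyGet? p.2 (-1) then p.2.dropLast else p.2
  small ++ (PySem.List.slice? large none none (-1)).getD []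

def solve (a : Int) (b : Int) (c : Int) (d : Int) : Int × Int :=
  let facs_a := factorizeA a
  let facs_b := factorizeA b
  let tar := a * b
  match facs_a.findSome? (fun fa => facs_b.findSome? (fun fb =>
      let fx := fa * fb
      let x := (PySem.Int.floordiv a fx + 1) * fx
      let fy := PySem.Int.floordiv tar fx
      let y := (PySem.Int.floordiv b fy + 1) * fy
      if x ≤ c ∧ y ≤ d then some (x, y) else none)) with
  | some r => r
  | none => (-1, -1)

-- ===== PORT B =====

-- inner 'while m % p == 0: m //= p; k += 1' of Source B; the fuel only makes it total
-- (each division at least halves m, so m.toNat steps suffice).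
def divOut (p : Int) : Nat → Int → Int → Int × Int
  | 0, m, k => (m, k)
  | f + 1, m, k =>
      if PySem.Int.mod m p = 0 then divOut p f (PySem.Int.floordiv m p) (k + 1) else (m, k)

-- outer 'while p * p <= m' trial-division loop of Source B; p increases by 1 every iteration,
-- so the fuel n.toNat + 2 only makes it total.
def tdLoop : Nat → Int → Int → List (Int × Int) → List (Int × Int) × Int
  | 0, m, _, pf => (pf, m)
  | f + 1, m, p, pf =>
      if p * p ≤ m then
        if PySem.Int.mod m p = 0 then
          let r := divOut p m.toNat m 0
          tdLoop f r.1 (p + 1) (pf ++ [(p, r.2)])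
        else tdLoop f m (p + 1) pf
      else (pf, m)

-- p ** e for e ≥ 0 (every e this program uses) is exactly p ^ e.toNat.
def factorizeB (n : Int) : List Int :=
  let r := tdLoop (n.toNat + 2) n 2 []
  let pf := if 1 < r.2 then r.1 ++ [(r.2, 1)] else r.1
  let divs := pf.foldl
    (fun divs pk =>
      divs.flatMap (fun dv => (PySem.List.pyRange 0 (pk.2 + 1) 1).map (fun e => dv * pk.1 ^ e.toNat)))
    [1]
  PySem.List.sorted divs (fun x => x) false

def solve_alt (a : Int) (b : Int) (c : Int) (d : Int) : Int × Int :=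
  let tar := a * b
  let cands := (factorizeB a).flatMap (fun fa => (factorizeB b).map (fun fb =>
      let fx := fa * fb
      ((PySem.Int.floordiv a fx + 1) * fx,
       (PySem.Int.floordiv b (PySem.Int.floordiv tar fx) + 1) * PySem.Int.floordiv tar fx)))
  (cands.find? (fun xy => decide (xy.1 ≤ c ∧ xy.2 ≤ d))).getD (-1, -1)

-- ===== PRECONDITION & SPEC =====
-- Pre_ excludes exactly the inputs on which A raises: for a ≤ 0 or b ≤ 0 factorize raises
-- (TypeError on negative n, whose n**0.5 is complex; IndexError at small[-1] for n = 0).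
def Pre_solve (a : Int) (b : Int) (c : Int) (d : Int) : Prop := 1 ≤ a ∧ 1 ≤ b
instance (a : Int) (b : Int) (c : Int) (d : Int) : Decidable (Pre_solve a b c d) := by unfold Pre_solve; infer_instance

def pvWitness_solve : Int × Int × Int × Int := (4, 6, 10, 30)

def Spec_solve (a : Int) (b : Int) (c : Int) (d : Int) (out : Int × Int) : Prop := out = solve_alt a b c d
instance (a : Int) (b : Int) (c : Int) (d : Int) (out : Int × Int) : Decidable (Spec_solve a b c d out) := by unfold Spec_solve; infer_instance

-- ===== CLAIM (what is proved, stated in full; the proofs are below) =====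
def Claim_equal_solve : Prop := ∀ (a : Int) (b : Int) (c : Int) (d : Int), Dom_solve a b c d → Pre_solve a b c d → Spec_solve a b c d (solve a b c d)

-- ===== LEMMAS AND PROOFS =====

-- the product n = m * Π q^k encoded by a prime-power table
def prodPF (pf : List (Int × Int)) : Int := (pf.map (fun qk => qk.1 ^ qk.2.toNat)).prod

-- invariant of Source B's trial-division loop
def TDInv (n m p : Int) (pf : List (Int × Int)) : Prop :=
  1 ≤ m ∧ 2 ≤ p ∧ m * prodPF pf = n ∧
  (∀ qk ∈ pf, Prime qk.1 ∧ 2 ≤ qk.1 ∧ 1 ≤ qk.2 ∧ qk.1 < p) ∧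
  (pf.map Prod.fst).Pairwise (· < ·) ∧
  (∀ r : Int, 2 ≤ r → r < p → ¬ r ∣ m)

-- what holds of Source B's finished prime-power table
def TDFinal (n : Int) (pf : List (Int × Int)) : Prop :=
  prodPF pf = n ∧ (∀ qk ∈ pf, Prime qk.1 ∧ 2 ≤ qk.1 ∧ 1 ≤ qk.2) ∧
  (pf.map Prod.fst).Pairwise (· < ·)

-- an integer ≥ 2 with no divisor strictly between 1 and itself is prime
theorem prime_of_no_mid_dvd (q : Int) (h2 : 2 ≤ q)
    (h : ∀ r : Int, 2 ≤ r → r < q → ¬ r ∣ q) : Prime q := by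
  have hq : q = (q.toNat : Int) := by omega
  rw [hq]
  apply Nat.prime_iff_prime_int.mp
  rw [Nat.prime_def_lt]
  refine ⟨by omega, ?_⟩
  intro a ha hdvd
  by_contra h1
  have ha2 : 2 ≤ a := by
    rcases Nat.eq_zero_or_pos a with h0 | h0
    · subst h0; simp at hdvd; omega
    · omega
  have : (a : Int) ∣ q := by
    rw [hq]; exact_mod_cast Int.natCast_dvd_natCast.mpr hdvd
  exact h a (by omega) (by omega) this

-- the inner while loop divides p out of m completely
theorem divOut_spec (p : Int) (hp : 2 ≤ p) :
    ∀ (fuel : Nat) (m k : Int), 1 ≤ m → m.toNat ≤ fuel →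
      ∃ j : Nat, divOut p fuel m k = (m / p ^ j, k + j) ∧ p ^ j ∣ m ∧ ¬ p ∣ m / p ^ j ∧
        1 ≤ m / p ^ j := by
  intro fuel
  induction fuel with
  | zero => intro m k hm hf; omega
  | succ f ih =>
      intro m k hm hf
      simp only [divOut]
      by_cases hdvd : p ∣ m
      · rw [if_pos ((PySem.Int.mod_eq_zero_iff_dvd m p).mpr hdvd),
          PySem.Int.floordiv_eq_ediv_of_pos (by omega : (0:Int) < p)]
        have hmp : m / p * p = m := Int.ediv_mul_cancel hdvd
        have hm2 : 1 ≤ m / p := by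
          rw [Int.le_ediv_iff_mul_le (by omega : (0:Int) < p)]
          have := Int.le_of_dvd (by omega) hdvd
          omega
        have hhalf : 2 * (m / p) ≤ m := by nlinarith
        obtain ⟨j, heq, hjd, hnd, hge⟩ := ih (m / p) (k + 1) hm2 (by omega)
        refine ⟨j + 1, ?_, ?_, ?_, ?_⟩
        · rw [heq]
          have : m / p / p ^ j = m / p ^ (j + 1) := by
            rw [pow_succ', Int.ediv_ediv_of_nonneg (by omega : (0:Int) ≤ p)]
          rw [this]
          congr 1
          omega
        · obtain ⟨t, ht⟩ := hjd
          exact ⟨t, by rw [← hmp, ht]; ring⟩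
        · have : m / p / p ^ j = m / p ^ (j + 1) := by
            rw [pow_succ', Int.ediv_ediv_of_nonneg (by omega : (0:Int) ≤ p)]
          rwa [this] at hnd
        · have : m / p / p ^ j = m / p ^ (j + 1) := by
            rw [pow_succ', Int.ediv_ediv_of_nonneg (by omega : (0:Int) ≤ p)]
          rwa [this] at hge
      · rw [if_neg (fun h => hdvd ((PySem.Int.mod_eq_zero_iff_dvd m p).mp h))]
        exact ⟨0, by simp, by simp, by simpa using hdvd, by simpa using hm⟩

theorem prodPF_append (pf : List (Int × Int)) (q k : Int) :
    prodPF (pf ++ [(q, k)]) = prodPF pf * q ^ k.toNat := by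
  simp [prodPF]

-- the loop's exit state (p² > m) yields the finished table
theorem tdExit (n m p : Int) (pf : List (Int × Int)) (hinv : TDInv n m p pf)
    (hgt : m < p * p) :
    TDFinal n (if 1 < m then pf ++ [(m, 1)] else pf) := by
  obtain ⟨hm, hp, hprod, hkeys, hpair, hsieve⟩ := hinv
  by_cases hm1 : 1 < m
  · rw [if_pos hm1]
    have hpm : p ≤ m := by
      by_contra hmp
      exact hsieve m (by omega) (by omega) dvd_rfl
    have hmprime : Prime m := by
      apply prime_of_no_mid_dvd m (by omega)
      intro r hr2 hrm hdvd
      by_cases hrp : r < p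
      · exact hsieve r hr2 hrp hdvd
      · obtain ⟨s, hs⟩ := hdvd
        have hs2 : 2 ≤ s := by nlinarith
        have hsp : s < p := by nlinarith
        exact hsieve s hs2 hsp ⟨r, by rw [hs]; ring⟩
    refine ⟨?_, ?_, ?_⟩
    · rw [prodPF_append]; simp; linear_combination hprod
    · intro qk hqk
      rcases List.mem_append.mp hqk with h | h
      · exact ⟨(hkeys qk h).1, (hkeys qk h).2.1, (hkeys qk h).2.2.1⟩
      · simp at h; rw [h]; exact ⟨hmprime, by omega, by norm_num⟩
    · rw [List.map_append, List.pairwise_append]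
      refine ⟨hpair, by simp, ?_⟩
      intro x hx y hy
      simp at hy
      subst hy
      simp at hx
      obtain ⟨k, hk⟩ := hx
      have := hkeys (x, k) hk
      omega
  · rw [if_neg hm1]
    have hmeq : m = 1 := by omega
    refine ⟨by rw [← hprod, hmeq]; ring, fun qk h => ⟨(hkeys qk h).1, (hkeys qk h).2.1, (hkeys qk h).2.2.1⟩, hpair⟩

-- the trial-division loop reaches a finished prime-power table of n
theorem tdLoop_spec (n : Int) :
    ∀ (fuel : Nat) (m p : Int) (pf : List (Int × Int)), TDInv n m p pf →
      m.toNat + 3 ≤ fuel + p.toNat →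
      TDFinal n (if 1 < (tdLoop fuel m p pf).2
                 then (tdLoop fuel m p pf).1 ++ [((tdLoop fuel m p pf).2, 1)]
                 else (tdLoop fuel m p pf).1) := by
  intro fuel
  induction fuel with
  | zero =>
      intro m p pf hinv hf
      have hm := hinv.1
      have hp := hinv.2.1
      simp only [tdLoop]
      refine tdExit n m p pf hinv ?_
      have hpm : m + 3 ≤ p := by omega
      nlinarith
  | succ f ih =>
      intro m p pf hinv hf
      obtain ⟨hm, hp, hprod, hkeys, hpair, hsieve⟩ := hinv
      simp only [tdLoop]
      by_cases hle : p * p ≤ m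
      · rw [if_pos hle]
        by_cases hdvd : p ∣ m
        · rw [if_pos ((PySem.Int.mod_eq_zero_iff_dvd m p).mpr hdvd)]
          obtain ⟨j, heq, hjd, hnd, hge⟩ := divOut_spec p hp m.toNat m 0 hm le_rfl
          have hpj : m / p ^ j * p ^ j = m := Int.ediv_mul_cancel hjd
          have hj1 : 1 ≤ j := by
            rcases Nat.eq_zero_or_pos j with h0 | h0
            · exfalso; rw [h0] at hnd; simp at hnd; exact hnd hdvd
            · omega
          have hm'le : m / p ^ j ≤ m := by
            have h1 : (1:Int) ≤ p ^ j := one_le_pow₀ (by omega)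
            nlinarith
          have hlt : m / p ^ j < m := by
            have h2 : (2:Int) ≤ p ^ j := by
              calc (2:Int) ≤ p := hp
              _ = p ^ 1 := (pow_one p).symm
              _ ≤ p ^ j := pow_le_pow_right₀ (by omega) hj1
            nlinarith [hge]
          rw [heq]
          dsimp only
          apply ih
          · refine ⟨hge, by omega, ?_, ?_, ?_, ?_⟩
            · rw [prodPF_append]
              simp only [zero_add, Int.toNat_natCast]
              calc m / p ^ j * (prodPF pf * p ^ j)
                  = m / p ^ j * p ^ j * prodPF pf := by ring
                _ = m * prodPF pf := by rw [hpj]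
                _ = n := hprod
            · intro qk hqk
              rcases List.mem_append.mp hqk with h | h
              · have := hkeys qk h; exact ⟨this.1, this.2.1, this.2.2.1, by omega⟩
              · simp at h
                rw [h]
                refine ⟨?_, hp, by omega, by omega⟩
                apply prime_of_no_mid_dvd p hp
                intro r hr2 hrp hrdvd
                exact hsieve r hr2 hrp (hrdvd.trans hdvd)
            · rw [List.map_append, List.pairwise_append]
              refine ⟨hpair, by simp, ?_⟩
              intro x hx y hy
              simp at hy hx
              subst hy
              obtain ⟨k, hk⟩ := hx
              have := hkeys (x, k) hk
              omega
            · intro r hr2 hrp hrdvd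
              by_cases hcase : r < p
              · exact hsieve r hr2 hcase (hrdvd.trans ⟨p ^ j, hpj.symm⟩)
              · have : r = p := by omega
                subst this
                exact hnd hrdvd
          · have : (m / p ^ j).toNat < m.toNat := by omega
            have hp1 : (p + 1).toNat = p.toNat + 1 := by omega
            omega
        · rw [if_neg (fun h => hdvd ((PySem.Int.mod_eq_zero_iff_dvd m p).mp h))]
          apply ih
          · refine ⟨hm, by omega, hprod, ?_, hpair, ?_⟩
            · intro qk hqk; have := hkeys qk hqk; exact ⟨this.1, this.2.1, this.2.2.1, by omega⟩
            · intro r hr2 hrp hrdvd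
              by_cases hcase : r < p
              · exact hsieve r hr2 hcase hrdvd
              · have : r = p := by omega
                subst this
                exact hdvd hrdvd
          · have hp1 : (p + 1).toNat = p.toNat + 1 := by omega
            omega
      · rw [if_neg hle]
        exact tdExit n m p pf ⟨hm, hp, hprod, hkeys, hpair, hsieve⟩ (by omega)

-- q prime with q ∤ P: every positive divisor of P * q^k splits as d * q^e
theorem divisor_decomp (P q : Int) (hq : Prime q) (h2 : 2 ≤ q) (hqP : ¬ q ∣ P) :
    ∀ (k : Nat) (x : Int), 0 < x → x ∣ P * q ^ k →
      ∃ (dv : Int) (e : Nat), 0 < dv ∧ dv ∣ P ∧ e ≤ k ∧ x = dv * q ^ e := by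
  intro k
  induction k with
  | zero =>
      intro x hx hd
      exact ⟨x, 0, hx, by simpa using hd, le_refl 0, by simp⟩
  | succ k ih =>
      intro x hx hd
      by_cases hqx : q ∣ x
      · obtain ⟨x', hx'⟩ := hqx
        have hx'pos : 0 < x' := by nlinarith
        have hx'd : x' ∣ P * q ^ k := by
          have : q * x' ∣ q * (P * q ^ k) := by
            rw [← hx']
            calc x ∣ P * q ^ (k + 1) := hd
              _ = q * (P * q ^ k) := by ring
          exact (mul_dvd_mul_iff_left (by omega : q ≠ 0)).mp this
        obtain ⟨dv, e, hdv, hdvP, hek, hxe⟩ := ih x' hx'pos hx'd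
        exact ⟨dv, e + 1, hdv, hdvP, by omega, by rw [hx', hxe]; ring⟩
      · have hco : IsCoprime x (q ^ (k + 1)) :=
          (IsCoprime.pow_left ((hq.coprime_iff_not_dvd).mpr hqx)).symm
        exact ⟨x, 0, hx, hco.dvd_of_dvd_mul_right hd, by omega, by simp⟩

theorem pow_inj_int (q : Int) (h2 : 2 ≤ q) : Function.Injective (fun e : Nat => q ^ e) :=
  (strictMono_nat_of_lt_succ (fun n => by
    have h1 : (1:Int) < q := by omega
    calc q ^ n = q ^ n * 1 := by ring
      _ < q ^ n * q := by
          have := pow_pos (by omega : (0:Int) < q) n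
          nlinarith
      _ = q ^ (n + 1) := by ring)).injective

-- unique factorisation step: d₁ q^e₁ = d₂ q^e₂ with q prime not dividing P forces d₁ = d₂, e₁ = e₂
theorem cancel_pow_eq (P q d1 d2 : Int) (e1 e2 : Nat) (h2 : 2 ≤ q) (hqP : ¬ q ∣ P)
    (hd1 : d1 ∣ P) (hd2 : d2 ∣ P) (h1 : 0 < d1) (hpos2 : 0 < d2)
    (heq : d1 * q ^ e1 = d2 * q ^ e2) : d1 = d2 ∧ e1 = e2 := by
  have key : ∀ (a b : Int) (u v : Nat), a ∣ P → b ∣ P → u ≤ v → a * q ^ u = b * q ^ v → a = b ∧ u = v := by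
    intro a b u v haP hbP huv h
    have hqu : (q : Int) ^ u ≠ 0 := pow_ne_zero _ (by omega)
    have hab : a = b * q ^ (v - u) := by
      have hv : q ^ v = q ^ (v - u) * q ^ u := by
        rw [← pow_add]
        congr 1
        omega
      have : a * q ^ u = b * q ^ (v - u) * q ^ u := by
        rw [h, hv]
        ring
      exact mul_right_cancel₀ hqu this
    rcases Nat.eq_zero_or_pos (v - u) with h0 | h0
    · rw [h0, pow_zero, mul_one] at hab
      omega
    · exfalso
      apply hqP
      have hqa : q ∣ a := by
        rw [hab]
        exact Dvd.dvd.mul_left (dvd_pow_self q (by omega)) b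
      exact hqa.trans haP
  rcases le_total e1 e2 with h | h
  · exact key d1 d2 e1 e2 hd1 hd2 h heq
  · obtain ⟨h1', h2'⟩ := key d2 d1 e2 e1 hd2 hd1 h heq.symm
    exact ⟨h1'.symm, h2'.symm⟩

-- the divisor-generation fold of Source B: members = positive divisors of the table's product, no duplicates
theorem fold_divs :
    ∀ (pf : List (Int × Int)) (P : Int) (divs : List Int), 0 < P →
      (∀ qk ∈ pf, Prime qk.1 ∧ 2 ≤ qk.1 ∧ 1 ≤ qk.2 ∧ ¬ qk.1 ∣ P) →
      (pf.map Prod.fst).Pairwise (· < ·) →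
      (∀ x, x ∈ divs ↔ 0 < x ∧ x ∣ P) → divs.Nodup →
      (∀ x, x ∈ pf.foldl
          (fun divs pk =>
            divs.flatMap (fun dv => (PySem.List.pyRange 0 (pk.2 + 1) 1).map (fun e => dv * pk.1 ^ e.toNat)))
          divs ↔ 0 < x ∧ x ∣ P * prodPF pf) ∧
      (pf.foldl
          (fun divs pk =>
            divs.flatMap (fun dv => (PySem.List.pyRange 0 (pk.2 + 1) 1).map (fun e => dv * pk.1 ^ e.toNat)))
          divs).Nodup := by
  intro pf
  induction pf with
  | nil =>
      intro P divs hP hkeys hpair hmem hnd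
      refine ⟨fun x => ?_, hnd⟩
      simpa [prodPF] using hmem x
  | cons qk pf ih =>
      intro P divs hP hkeys hpair hmem hnd
      obtain ⟨q, k⟩ := qk
      obtain ⟨hqprime, hq2, hk1, hqP⟩ := hkeys (q, k) (by simp)
      dsimp only at hqprime hq2 hk1 hqP
      simp only [List.foldl_cons]
      -- the stepped divisor list
      have hrange : PySem.List.pyRange 0 (k + 1) 1 = (List.range (k.toNat + 1)).map (fun e : Nat => (e : Int)) := by
        rw [PySem.List.pyRange_zero]
        have hkk : (k + 1).toNat = k.toNat + 1 := by omega
        rw [hkk]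
      have hstep : divs.flatMap (fun dv => (PySem.List.pyRange 0 (k + 1) 1).map (fun e => dv * q ^ e.toNat))
          = divs.flatMap (fun dv => (List.range (k.toNat + 1)).map (fun e : Nat => dv * q ^ e)) := by
        rw [hrange]
        simp [List.map_map, Function.comp_def]
      rw [hstep]
      set divs' := divs.flatMap (fun dv => (List.range (k.toNat + 1)).map (fun e : Nat => dv * q ^ e)) with hdivs'
      have hmem' : ∀ x, x ∈ divs' ↔ 0 < x ∧ x ∣ P * q ^ k.toNat := by
        intro x
        rw [hdivs']
        simp only [List.mem_flatMap, List.mem_map, List.mem_range]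
        constructor
        · rintro ⟨dv, hdv, e, he, rfl⟩
          obtain ⟨hdvpos, hdvP⟩ := (hmem dv).mp hdv
          constructor
          · positivity
          · exact mul_dvd_mul hdvP (pow_dvd_pow q (by omega))
        · rintro ⟨hxpos, hxd⟩
          obtain ⟨dv, e, hdvpos, hdvP, hek, rfl⟩ :=
            divisor_decomp P q hqprime hq2 hqP k.toNat x hxpos hxd
          exact ⟨dv, (hmem dv).mpr ⟨hdvpos, hdvP⟩, e, by omega, rfl⟩
      have hnd' : divs'.Nodup := by
        rw [hdivs', List.nodup_flatMap]
        constructor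
        · intro dv hdv
          apply List.Nodup.map
          · intro e1 e2 h
            have hdvne : dv ≠ 0 := by
              have := (hmem dv).mp hdv
              omega
            exact pow_inj_int q hq2 (mul_left_cancel₀ hdvne h)
          · exact List.nodup_range
        · rw [List.pairwise_iff_forall_sublist]
          intro d1 d2 hsub
          have hd1 : d1 ∈ divs := hsub.subset (by simp)
          have hd2 : d2 ∈ divs := hsub.subset (by simp [List.mem_cons])
          have hne : d1 ≠ d2 := by
            intro h
            subst h
            exact (List.nodup_iff_sublist.mp hnd d1) hsub
          intro x hx1 hx2
          simp only [List.mem_map, List.mem_range] at hx1 hx2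
          obtain ⟨e1, he1, rfl⟩ := hx1
          obtain ⟨e2, he2, heq⟩ := hx2
          obtain ⟨h1, _⟩ := cancel_pow_eq P q d2 d1 e2 e1 hq2 hqP
            ((hmem d2).mp hd2).2 ((hmem d1).mp hd1).2 ((hmem d2).mp hd2).1 ((hmem d1).mp hd1).1 heq
          exact hne (h1.symm)
      have hprod : P * prodPF ((q, k) :: pf) = (P * q ^ k.toNat) * prodPF pf := by
        simp [prodPF]
        ring
      have hres := ih (P * q ^ k.toNat) divs'
        (by positivity)
        (by
          intro qk' hqk'
          obtain ⟨hp', h2', h1', hP'⟩ := hkeys qk' (by simp [hqk'])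
          refine ⟨hp', h2', h1', ?_⟩
          intro hdd
          rcases (Prime.dvd_mul hp').mp hdd with h | h
          · exact hP' h
          · have hq'q : qk'.1 ∣ q := hp'.dvd_of_dvd_pow h
            have : qk'.1.natAbs ∣ q.natAbs := Int.natAbs_dvd_natAbs.mpr hq'q
            have heq' : qk'.1.natAbs = q.natAbs :=
              (Nat.prime_dvd_prime_iff_eq (Int.prime_iff_natAbs_prime.mp hp')
                (Int.prime_iff_natAbs_prime.mp hqprime)).mp this
            have : qk'.1 = q := by omega
            -- but q < qk'.1 from the sorted key list
            have hlt : q < qk'.1 := by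
              have := (List.pairwise_cons.mp hpair).1
              exact this qk'.1 (List.mem_map_of_mem hqk')
            omega)
        (by exact (List.pairwise_cons.mp hpair).2)
        hmem' hnd'
      rw [hprod]
      exact hres

-- B's divisor list: sorted, duplicate-free, exactly the positive divisors of n
theorem factorizeB_char (n : Int) (hn : 1 ≤ n) :
    (∀ x, x ∈ factorizeB n ↔ 0 < x ∧ x ∣ n) ∧ (factorizeB n).Pairwise (· < ·) := by
  have hinv : TDInv n n 2 [] := by
    refine ⟨hn, le_refl 2, by simp [prodPF], by simp, by simp, ?_⟩
    intro r h2 hlt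
    omega
  have hfin := tdLoop_spec n (n.toNat + 2) n 2 [] hinv (by omega)
  set res := tdLoop (n.toNat + 2) n 2 [] with hres
  set pfF := if 1 < res.2 then res.1 ++ [(res.2, 1)] else res.1 with hpfF
  obtain ⟨hprodF, hkeysF, hpairF⟩ := hfin
  have hdivs := fold_divs pfF 1 [1] (by norm_num)
    (by
      intro qk hqk
      obtain ⟨h1, h2, h3⟩ := hkeysF qk hqk
      refine ⟨h1, h2, h3, ?_⟩
      intro hdvd
      have := Int.le_of_dvd (by norm_num) hdvd
      omega)
    hpairF
    (by
      intro x
      simp only [List.mem_singleton]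
      constructor
      · rintro rfl; norm_num
      · rintro ⟨hx, hd⟩
        exact Int.eq_one_of_dvd_one (by omega) hd)
    (by simp)
  obtain ⟨hmemD, hndD⟩ := hdivs
  set divsOut := pfF.foldl
    (fun divs pk =>
      divs.flatMap (fun dv => (PySem.List.pyRange 0 (pk.2 + 1) 1).map (fun e => dv * pk.1 ^ e.toNat)))
    [1] with hdo
  have hfb : factorizeB n = PySem.List.sorted divsOut (fun x => x) false := by
    rw [factorizeB]
  have hperm : (factorizeB n).Perm divsOut := by
    rw [hfb]; exact PySem.List.sorted_perm divsOut (fun x => x) false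
  constructor
  · intro x
    rw [hperm.mem_iff, hmemD x, one_mul, hprodF]
  · have hle : (factorizeB n).Pairwise (· ≤ ·) := by
      rw [hfb]; exact PySem.List.sorted_pairwise divsOut (fun x => x)
    have hnd : (factorizeB n).Nodup := hperm.symm.nodup hndD
    exact (hle.and hnd).imp (fun h => lt_of_le_of_ne h.1 h.2)

-- A's loop accumulates the filtered candidates and their cofactors, in order
theorem pair_foldl_filter (P : Int → Prop) [DecidablePred P] (g : Int → Int) (xs : List Int) :
    ∀ s0 l0 : List Int,
      xs.foldl (fun (sl : List Int × List Int) i =>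
        if P i then (sl.1 ++ [i], sl.2 ++ [g i]) else sl) (s0, l0)
      = (s0 ++ xs.filter (fun i => decide (P i)),
         l0 ++ (xs.filter (fun i => decide (P i))).map g) := by
  induction xs with
  | nil => intro s0 l0; simp
  | cons x xs ih =>
      intro s0 l0
      by_cases hp : P x <;> simp [List.foldl_cons, hp, ih]

-- range(1, m, 2) (over Nat lengths): filtering kills exactly the even candidates
theorem filter_aux (p : Int → Bool) (hev : ∀ i : Int, i % 2 = 0 → p i = false) :
    ∀ N : Nat,
      ((List.range ((N + 1) / 2)).map (fun (k : Nat) => (1 : Int) + 2 * (k : Int))).filter p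
        = ((List.range N).map (fun (k : Nat) => (1 : Int) + 1 * (k : Int))).filter p := by
  intro N
  induction N with
  | zero => rfl
  | succ N ih =>
      rcases Nat.even_or_odd N with ⟨t, ht⟩ | ⟨t, ht⟩
      · have e1 : (N + 1 + 1) / 2 = (N + 1) / 2 + 1 := by omega
        have e2 : (1 : Int) + 2 * (((N + 1) / 2 : Nat) : Int) = 1 + 1 * (N : Nat) := by
          have : (N + 1) / 2 = t := by omega
          rw [this]; omega
        rw [e1, List.range_succ, List.map_append, List.filter_append, ih,
          List.range_succ, List.map_append, List.filter_append]
        simp only [List.map_cons, List.map_nil, e2]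
      · have e1 : (N + 1 + 1) / 2 = (N + 1) / 2 := by omega
        have hpf : p (1 + (N : Int)) = false := by
          apply hev; omega
        rw [e1, ih, List.range_succ, List.map_append, List.filter_append]
        simp [hpf]

-- range(1, m, 2) sees every candidate that can divide an odd n
theorem filter_range_two_eq_one (p : Int → Bool) (m : Int)
    (hev : ∀ i : Int, i % 2 = 0 → p i = false) :
    (PySem.List.pyRange 1 m 2).filter p = (PySem.List.pyRange 1 m 1).filter p := by
  rw [PySem.List.pyRange_of_pos 1 m (by norm_num : (0:Int) < 2),
      PySem.List.pyRange_of_pos 1 m (by norm_num : (0:Int) < 1)]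
  by_cases hm : 1 < m
  · rw [if_pos hm, if_pos hm]
    have h2 : ((m - 1 + 2 - 1) / 2).toNat = ((m - 1).toNat + 1) / 2 := by omega
    have h1 : ((m - 1 + 1 - 1) / 1).toNat = (m - 1).toNat := by omega
    rw [h2, h1]
    exact filter_aux p hev (m - 1).toNat
  · rw [if_neg hm, if_neg hm]
    rfl

-- A's divisor list: same characterisation
theorem factorizeA_char (n : Int) (hn : 1 ≤ n) :
    (∀ x, x ∈ factorizeA n ↔ 0 < x ∧ x ∣ n) ∧ (factorizeA n).Pairwise (· < ·) := by
  have hR1 : 1 ≤ (n.toNat.sqrt : Int) := by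
    have : 1 ≤ n.toNat.sqrt := Nat.le_sqrt.mpr (by omega)
    omega
  set R : Int := (n.toNat.sqrt : Int) with hRdef
  have hRsq : R * R ≤ n := by
    have h0 : n.toNat.sqrt * n.toNat.sqrt ≤ n.toNat := by
      simpa [pow_two] using Nat.sqrt_le' n.toNat
    have h2 : ((n.toNat.sqrt * n.toNat.sqrt : Nat) : Int) ≤ ((n.toNat : Nat) : Int) := by
      exact_mod_cast h0
    push_cast at h2
    rw [hRdef]
    exact le_trans h2 (by omega)
  have hRsq2 : n < (R + 1) * (R + 1) := by
    have h0 : n.toNat < (n.toNat.sqrt + 1) * (n.toNat.sqrt + 1) := by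
      simpa [pow_two, Nat.succ_eq_add_one] using Nat.lt_succ_sqrt' n.toNat
    have h2 : ((n.toNat : Nat) : Int) < (((n.toNat.sqrt + 1) * (n.toNat.sqrt + 1) : Nat) : Int) := by
      exact_mod_cast h0
    push_cast at h2
    rw [hRdef]
    exact lt_of_le_of_lt (by omega) h2
  set F : List Int :=
    (PySem.List.pyRange 1 (R + 1) 1).filter (fun i => decide (PySem.Int.mod n i = 0)) with hF
  have hmem : ∀ i ∈ F, 1 ≤ i ∧ i ≤ R ∧ i ∣ n := by
    intro i hi
    rw [hF, List.mem_filter, PySem.List.mem_pyRange_one] at hi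
    obtain ⟨⟨hi1, hi2⟩, hi3⟩ := hi
    refine ⟨hi1, by omega, ?_⟩
    rw [← PySem.Int.mod_eq_zero_iff_dvd]
    simpa using hi3
  have hmemF : ∀ x, 1 ≤ x → x ≤ R → x ∣ n → x ∈ F := by
    intro x h1 h2 h3
    rw [hF, List.mem_filter, PySem.List.mem_pyRange_one]
    refine ⟨⟨h1, by omega⟩, ?_⟩
    simp [PySem.Int.mod_eq_zero_iff_dvd, h3]
  have hFne : F ≠ [] := by
    have h1 : (1 : Int) ∈ F := hmemF 1 le_rfl hR1 (one_dvd n)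
    intro h; rw [h] at h1; simp at h1
  set lst : Int := F.getLast hFne with hlstdef
  obtain ⟨hlst1, hlstR, hlstdvd⟩ := hmem lst (List.getLast_mem hFne)
  have hglst : PySem.Int.floordiv n lst = n / lst :=
    PySem.Int.floordiv_eq_ediv_of_pos (by omega)
  have hsplit : F.dropLast ++ [lst] = F := List.dropLast_append_getLast hFne
  have hpwF : F.Pairwise (· < ·) :=
    List.Pairwise.filter _ (PySem.List.pairwise_lt_pyRange_one 1 (R + 1))
  have hdl : ∀ x ∈ F.dropLast, x < lst := by
    have hpw' : (F.dropLast ++ [lst]).Pairwise (· < ·) := by rw [hsplit]; exact hpwF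
    intro x hx
    exact (List.pairwise_append.mp hpw').2.2 x hx lst (by simp)
  -- exact division facts for divisors in F
  have hgmul : ∀ i ∈ F, n / i * i = n := fun i hi => Int.ediv_mul_cancel (hmem i hi).2.2
  have hgpos : ∀ i ∈ F, 1 ≤ n / i := by
    intro i hi
    rw [Int.le_ediv_iff_mul_le (by have := (hmem i hi).1; omega)]
    have := (hmem i hi).2.1
    have := (hmem i hi).1
    nlinarith
  have hgR : ∀ i ∈ F, R ≤ n / i := by
    intro i hi
    obtain ⟨h1, h2, _⟩ := hmem i hi
    have hm := hgmul i hi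
    nlinarith [hgpos i hi]
  -- only the last element of F can be an exact square root of n
  have hsq_lst : ∀ i ∈ F, i * i = n → i = lst := by
    intro i hi hisq
    obtain ⟨hi1, hiR, _⟩ := hmem i hi
    have hiR' : i = R := by nlinarith
    by_contra hne
    have hmemdl : i ∈ F.dropLast := by
      have : i ∈ F.dropLast ++ [lst] := by rw [hsplit]; exact hi
      rcases List.mem_append.mp this with h | h
      · exact h
      · simp at h; exact absurd h hne
    have := hdl i hmemdl
    omega
  have hsq_iff : lst = PySem.Int.floordiv n lst ↔ lst * lst = n := by
    rw [hglst]
    constructor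
    · intro h
      calc lst * lst = lst * (n / lst) := by rw [← h]
        _ = n := Int.mul_ediv_cancel' hlstdvd
    · intro h
      rw [← h, Int.mul_ediv_cancel_left _ (by omega : lst ≠ 0)]
  have hmap_split : F.map (fun i => PySem.Int.floordiv n i)
      = F.dropLast.map (fun i => PySem.Int.floordiv n i) ++ [PySem.Int.floordiv n lst] := by
    conv_lhs => rw [← hsplit]
    simp
  have hget_small : PySem.List.pyGet? F (-1) = some lst := by
    conv_lhs => rw [← hsplit]
    exact PySem.List.pyGet?_neg_one_append_singleton _ _
  have hget_large : PySem.List.pyGet? (F.map (fun i => PySem.Int.floordiv n i)) (-1)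
      = some (PySem.Int.floordiv n lst) := by
    rw [hmap_split]
    exact PySem.List.pyGet?_neg_one_append_singleton _ _
  have hAfilter : ((PySem.List.pyRange 1 (R + 1) (if PySem.Int.band n 1 ≠ 0 then 2 else 1)).filter
      (fun i => decide (PySem.Int.mod n i = 0))) = F := by
    rcases Int.emod_two_eq n with he | ho
    · have hb0 : PySem.Int.band n 1 = 0 := by
        rw [PySem.Int.band_one, PySem.Int.mod_eq_emod_of_pos (by norm_num : (0:Int) < 2), he]
      rw [hb0]
      simp [hF]
    · have hb1 : PySem.Int.band n 1 = 1 := by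
        rw [PySem.Int.band_one, PySem.Int.mod_eq_emod_of_pos (by norm_num : (0:Int) < 2), ho]
      rw [hb1, if_pos (by norm_num : (1:Int) ≠ 0), hF]
      apply filter_range_two_eq_one
      intro i hi
      simp only [decide_eq_false_iff_not]
      intro hmod
      have hdvd : i ∣ n := (PySem.Int.mod_eq_zero_iff_dvd n i).mp hmod
      have h2i : (2:Int) ∣ i := Int.dvd_of_emod_eq_zero hi
      have : (2:Int) ∣ n := h2i.trans hdvd
      omega
  -- A's result, as F followed by reversed cofactors of S
  set S : List Int := if lst * lst = n then F.dropLast else F with hSdef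
  have hA : factorizeA n = F ++ (S.map (fun i => PySem.Int.floordiv n i)).reverse := by
    simp only [factorizeA]
    rw [pair_foldl_filter (fun i => PySem.Int.mod n i = 0) (fun i => PySem.Int.floordiv n i)]
    simp only [List.nil_append, ← hRdef, hAfilter, hget_small, hget_large,
      PySem.List.slice?_none_none_neg_one, Option.getD_some, Option.some_inj]
    rw [hSdef]
    by_cases hC : lst * lst = n
    · rw [if_pos (hsq_iff.mpr hC), if_pos hC, ← List.map_dropLast]
    · rw [if_neg (fun h => hC (hsq_iff.mp h)), if_neg hC]
  have hSsub : ∀ x ∈ S, x ∈ F := by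
    intro x hx
    rw [hSdef] at hx
    split at hx
    · exact List.dropLast_subset _ hx
    · exact hx
  have hSmem : ∀ j ∈ F, (lst * lst = n → j ≠ lst) → j ∈ S := by
    intro j hj hne
    rw [hSdef]
    split
    · rename_i hC
      have : j ∈ F.dropLast ++ [lst] := by rw [hsplit]; exact hj
      rcases List.mem_append.mp this with h | h
      · exact h
      · simp at h; exact absurd h (hne hC)
    · exact hj
  constructor
  · -- membership characterisation
    intro x
    rw [hA]
    simp only [List.mem_append, List.mem_reverse, List.mem_map]
    constructor
    · rintro (hx | ⟨j, hj, rfl⟩)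
      · obtain ⟨h1, _, h3⟩ := hmem x hx
        exact ⟨by omega, h3⟩
      · have hjF := hSsub j hj
        rw [PySem.Int.floordiv_eq_ediv_of_pos (by have := (hmem j hjF).1; omega)]
        refine ⟨by have := hgpos j hjF; omega, ?_⟩
        exact ⟨j, (hgmul j hjF).symm⟩
    · rintro ⟨hxpos, hxdvd⟩
      by_cases hxR : x ≤ R
      · exact Or.inl (hmemF x (by omega) hxR hxdvd)
      · right
        rw [not_le] at hxR
        obtain ⟨j, hj⟩ := hxdvd
        have hj1 : 1 ≤ j := by nlinarith
        have hjR : j ≤ R := by nlinarith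
        have hjdvd : j ∣ n := ⟨x, by rw [hj]; ring⟩
        have hjF : j ∈ F := hmemF j hj1 hjR hjdvd
        have hgj : n / j = x := by
          rw [hj, Int.mul_ediv_cancel _ (by omega : j ≠ 0)]
        refine ⟨j, hSmem j hjF ?_, ?_⟩
        · intro hC hjlst
          rw [hjlst] at hj
          have : x = lst := by nlinarith
          omega
        · rw [PySem.Int.floordiv_eq_ediv_of_pos (by omega), hgj]
  · -- sortedness
    rw [hA, List.pairwise_append]
    refine ⟨hpwF, ?_, ?_⟩
    · rw [List.pairwise_reverse, List.pairwise_map]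
      have hpwS : S.Pairwise (· < ·) := by
        rw [hSdef]; split
        · exact hpwF.sublist (List.dropLast_sublist F)
        · exact hpwF
      apply List.Pairwise.imp_of_mem ?_ hpwS
      intro i j hi hj hij
      have hiF := hSsub i hi
      have hjF := hSsub j hj
      rw [PySem.Int.floordiv_eq_ediv_of_pos (b := i) (by have := (hmem i hiF).1; omega),
          PySem.Int.floordiv_eq_ediv_of_pos (b := j) (by have := (hmem j hjF).1; omega)]
      by_contra hle
      rw [not_lt] at hle
      have h1 := hgmul i hiF
      have h2 := hgmul j hjF
      have h3 := hgpos i hiF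
      have h4 := hgpos j hjF
      have h5 := (hmem i hiF).1
      nlinarith
    · intro x hx y hy
      rw [List.mem_reverse, List.mem_map] at hy
      obtain ⟨j, hj, rfl⟩ := hy
      have hjF := hSsub j hj
      rw [PySem.Int.floordiv_eq_ediv_of_pos (by have := (hmem j hjF).1; omega)]
      obtain ⟨hx1, hxR, _⟩ := hmem x hx
      have hgRj := hgR j hjF
      rcases lt_or_eq_of_le (le_trans hxR hgRj) with h | h
      · exact h
      · exfalso
        -- x = n / j forces x = R = n / j, n = R² and j = lst, impossible in either branch
        have hxRR : x = R := by omega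
        have hgjR : n / j = R := by omega
        obtain ⟨hj1, hjR, hjdvd⟩ := hmem j hjF
        have hjmul := hgmul j hjF
        have hnjR : j * R = n := by rw [← hgjR]; linarith [hjmul]
        have hjeqR : j = R := by nlinarith
        have hnRR : n = R * R := by rw [← hnjR, hjeqR]
        have hRF : R ∈ F := by rw [← hxRR]; exact hx
        have hlstR' : lst = R := by
          have h1 : R ≤ lst := by
            by_contra hc
            push_neg at hc
            have : R ∈ F.dropLast := by
              have : R ∈ F.dropLast ++ [lst] := by rw [hsplit]; exact hRF
              rcases List.mem_append.mp this with h | h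
              · exact h
              · simp at h; omega
            have := hdl R this
            omega
          omega
        have hpop : lst * lst = n := by rw [hlstR', ← hnRR]
        rw [hSdef, if_pos hpop] at hj
        have := hdl j hj
        omega

-- the two factorize implementations agree on positive n
theorem factorize_eq (n : Int) (hn : 1 ≤ n) : factorizeA n = factorizeB n := by
  obtain ⟨hAm, hAp⟩ := factorizeA_char n hn
  obtain ⟨hBm, hBp⟩ := factorizeB_char n hn
  have hnodupA : (factorizeA n).Nodup := hAp.imp ne_of_lt
  have hnodupB : (factorizeB n).Nodup := hBp.imp ne_of_lt
  have hperm : (factorizeA n).Perm (factorizeB n) :=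
    (List.perm_ext_iff_of_nodup hnodupA hnodupB).mpr (fun x => by rw [hAm, hBm])
  exact List.Perm.eq_of_pairwise (fun x y _ _ hxy hyx => absurd hyx (not_lt.mpr hxy.le)) hAp hBp hperm

-- the inner for-loop with return: findSome? of a guarded some = find? over the mapped pairs
theorem findSome?_guard_eq_find?_map (f g : Int → Int) (c d : Int) (l : List Int) :
    l.findSome? (fun y => if f y ≤ c ∧ g y ≤ d then some (f y, g y) else none)
      = (l.map (fun y => (f y, g y))).find? (fun xy => decide (xy.1 ≤ c ∧ xy.2 ≤ d)) := by
  induction l with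
  | nil => rfl
  | cons x xs ih =>
      by_cases hp : f x ≤ c ∧ g x ≤ d <;>
        simp [hp, ih]

-- the two nested for-loops with return = find? over the flattened candidate list
theorem findSome?_nested_eq_find?_flatMap (f g : Int → Int → Int) (c d : Int)
    (la lb : List Int) :
    la.findSome? (fun u => lb.findSome? (fun v =>
        if f u v ≤ c ∧ g u v ≤ d then some (f u v, g u v) else none))
      = (la.flatMap (fun u => lb.map (fun v => (f u v, g u v)))).find?
          (fun xy => decide (xy.1 ≤ c ∧ xy.2 ≤ d)) := by
  induction la with
  | nil => rfl
  | cons x xs ih =>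
      simp only [List.findSome?_cons, List.flatMap_cons, List.find?_append,
        findSome?_guard_eq_find?_map (f x) (g x) c d lb, ih]
      cases (lb.map (fun v => (f x v, g x v))).find? (fun xy => decide (xy.1 ≤ c ∧ xy.2 ≤ d)) <;> simp

-- ===== VERDICT (by name: the statement is the Claim_ definition above) =====
theorem solve_spec : Claim_equal_solve := by
  intro a b c d _ hpre
  obtain ⟨ha, hb⟩ := hpre
  unfold Spec_solve
  simp only [solve, solve_alt]
  rw [factorize_eq a ha, factorize_eq b hb]
  rw [findSome?_nested_eq_find?_flatMap
    (fun fa fb => (PySem.Int.floordiv a (fa * fb) + 1) * (fa * fb))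
    (fun fa fb => (PySem.Int.floordiv b (PySem.Int.floordiv (a * b) (fa * fb)) + 1)
        * PySem.Int.floordiv (a * b) (fa * fb)) c d]
  cases (((factorizeB a).flatMap (fun fa => (factorizeB b).map (fun fb =>
      ((PySem.Int.floordiv a (fa * fb) + 1) * (fa * fb),
       (PySem.Int.floordiv b (PySem.Int.floordiv (a * b) (fa * fb)) + 1)
          * PySem.Int.floordiv (a * b) (fa * fb))))).find?
      (fun xy => decide (xy.1 ≤ c ∧ xy.2 ≤ d))) <;> rfl
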